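-- pv_equiv track=rewrite | github.com/maastrichtlawtech/extraction_libraries | cellar/cellar_extractor/citations_adder.py | clean_celex
-- ===== SOURCE A (Python) =====
-- def clean_celex(celex):
--     normal_list = list()
--     contains_list = list()
--     for c1 in celex:
--         if ";" in c1:
--             celexes = c1.split(";")
--             for c2 in celexes:
--                 if "_" not in c2:
--                     if "(" in c2:
--                         contains_list.append(c2.replace("(", "").replace(")", ""))
--                     else:
--                         normal_list.append(c2)
--         else:
--             if "(" in c1:
--                 contains_list.append(c1.replace("(", "").replace(")", ""))
--             else:
--                 normal_list.append(c1)
--     return normal_list, contains_list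
-- ===== SOURCE B (Python) =====
-- def clean_celex(celex):
--     # Two flat passes: flatten into tokens, then classify; same return as A.
--     tokens = []
--     for c in celex:
--         if ";" in c:
--             tokens.extend(t for t in c.split(";") if "_" not in t)
--         else:
--             tokens.append(c)
--     normal_list = []
--     contains_list = []
--     for t in tokens:
--         if "(" in t:
--             contains_list.append(t.replace("(", "").replace(")", ""))
--         else:
--             normal_list.append(t)
--     return normal_list, contains_list
-- ===== Notes on version B (the rewrite author's own statement) =====
-- stated objective: alternative
-- what changed: Replaces A's branch-in-branch single loop by two flat passes: first flatten the input into one token list (splitting on ';' and dropping '_' parts only for split strings), then classify each token into normal/contains in a second pass.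
import Mathlib
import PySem

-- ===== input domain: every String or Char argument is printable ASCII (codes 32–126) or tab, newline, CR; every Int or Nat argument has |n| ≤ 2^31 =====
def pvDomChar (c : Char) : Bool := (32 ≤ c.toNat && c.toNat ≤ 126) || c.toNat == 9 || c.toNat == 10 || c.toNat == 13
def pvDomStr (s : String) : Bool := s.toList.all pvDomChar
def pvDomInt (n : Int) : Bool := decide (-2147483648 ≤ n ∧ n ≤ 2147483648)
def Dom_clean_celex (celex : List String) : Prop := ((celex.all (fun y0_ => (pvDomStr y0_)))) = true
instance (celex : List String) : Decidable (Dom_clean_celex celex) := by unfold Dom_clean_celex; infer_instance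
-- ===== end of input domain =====

-- B replaces A's nested branch-in-branch loop by two flat passes (flatten to tokens, then classify); same output, same cost.

-- ===== PORT A =====
def clean_celex (celex : List String) : List String × List String :=
  celex.foldl (fun acc c1 =>
    if PySem.Str.isIn ";" c1 then
      (((PySem.Str.split? c1 ";").getD [])).foldl (fun acc2 c2 =>
        if PySem.Str.isIn "_" c2 then acc2
        else if PySem.Str.isIn "(" c2 then
          (acc2.1, acc2.2 ++ [PySem.Str.replace (PySem.Str.replace c2 "(" "") ")" ""])
        else (acc2.1 ++ [c2], acc2.2)) acc
    else
      if PySem.Str.isIn "(" c1 then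
        (acc.1, acc.2 ++ [PySem.Str.replace (PySem.Str.replace c1 "(" "") ")" ""])
      else (acc.1 ++ [c1], acc.2)) ([], [])

-- ===== PORT B =====
def clean_celex_alt (celex : List String) : List String × List String :=
  let tokens := celex.foldl (fun ts c =>
    if PySem.Str.isIn ";" c then
      ts ++ (((PySem.Str.split? c ";").getD [])).filter (fun t => !PySem.Str.isIn "_" t)
    else ts ++ [c]) []
  tokens.foldl (fun acc t =>
    if PySem.Str.isIn "(" t then
      (acc.1, acc.2 ++ [PySem.Str.replace (PySem.Str.replace t "(" "") ")" ""])
    else (acc.1 ++ [t], acc.2)) ([], [])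

-- ===== PRECONDITION & SPEC =====
def Spec_clean_celex (celex : List String) (out : List String × List String) : Prop := out = clean_celex_alt celex
instance (celex : List String) (out : List String × List String) : Decidable (Spec_clean_celex celex out) := by unfold Spec_clean_celex; infer_instance

-- ===== CLAIM (what is proved, stated in full; the proofs are below) =====
def Claim_equal_clean_celex : Prop := ∀ (celex : List String), Dom_clean_celex celex → Spec_clean_celex celex (clean_celex celex)

-- ===== LEMMAS AND PROOFS =====

-- B's classify step, named for the proofs
def pvClassify (acc : List String × List String) (t : String) : List String × List String :=
  if PySem.Str.isIn "(" t then
    (acc.1, acc.2 ++ [PySem.Str.replace (PySem.Str.replace t "(" "") ")" ""])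
  else (acc.1 ++ [t], acc.2)

-- A's inner loop over the split parts equals classifying the '_'-filtered parts
theorem inner_eq_filter (parts : List String) (acc : List String × List String) :
    parts.foldl (fun acc2 c2 =>
      if PySem.Str.isIn "_" c2 then acc2
      else if PySem.Str.isIn "(" c2 then
        (acc2.1, acc2.2 ++ [PySem.Str.replace (PySem.Str.replace c2 "(" "") ")" ""])
      else (acc2.1 ++ [c2], acc2.2)) acc
    = (parts.filter (fun t => !PySem.Str.isIn "_" t)).foldl pvClassify acc := by
  induction parts generalizing acc with
  | nil => rfl
  | cons p ps ih =>
    simp only [List.foldl_cons, List.filter_cons]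
    by_cases h : PySem.Chars.isIn ['_'] p.toList = true
    · simp [h]; exact ih acc
    · simp [h, pvClassify]; split_ifs <;> exact ih _

-- A's outer loop equals classifying the flattened token list
theorem aLoop_eq_tokens (celex : List String) (acc : List String × List String) :
    celex.foldl (fun acc c1 =>
      if PySem.Str.isIn ";" c1 then
        (((PySem.Str.split? c1 ";").getD [])).foldl (fun acc2 c2 =>
          if PySem.Str.isIn "_" c2 then acc2
          else if PySem.Str.isIn "(" c2 then
            (acc2.1, acc2.2 ++ [PySem.Str.replace (PySem.Str.replace c2 "(" "") ")" ""])
          else (acc2.1 ++ [c2], acc2.2)) acc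
      else
        if PySem.Str.isIn "(" c1 then
          (acc.1, acc.2 ++ [PySem.Str.replace (PySem.Str.replace c1 "(" "") ")" ""])
        else (acc.1 ++ [c1], acc.2)) acc
    = (celex.flatMap (fun c =>
        if PySem.Str.isIn ";" c then
          (((PySem.Str.split? c ";").getD [])).filter (fun t => !PySem.Str.isIn "_" t)
        else [c])).foldl pvClassify acc := by
  induction celex generalizing acc with
  | nil => rfl
  | cons c cs ih =>
    simp only [List.foldl_cons, List.flatMap_cons, List.foldl_append]
    by_cases h : PySem.Str.isIn ";" c = true
    · rw [if_pos h, if_pos h, inner_eq_filter]; exact ih _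
    · rw [if_neg h, if_neg h]
      simp only [List.foldl_cons, List.foldl_nil, pvClassify]
      by_cases h2 : PySem.Str.isIn "(" c = true
      · rw [if_pos h2]; exact ih _
      · rw [if_neg h2]; exact ih _

-- B's first pass builds exactly that flattened token list
theorem tokens_eq_flatMap (celex : List String) :
    celex.foldl (fun ts c =>
      if PySem.Str.isIn ";" c then
        ts ++ (((PySem.Str.split? c ";").getD [])).filter (fun t => !PySem.Str.isIn "_" t)
      else ts ++ [c]) []
    = celex.flatMap (fun c =>
        if PySem.Str.isIn ";" c then
          (((PySem.Str.split? c ";").getD [])).filter (fun t => !PySem.Str.isIn "_" t)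
        else [c]) := by
  have : ∀ (l : List String) (ts : List String),
      l.foldl (fun ts c =>
        if PySem.Str.isIn ";" c then
          ts ++ (((PySem.Str.split? c ";").getD [])).filter (fun t => !PySem.Str.isIn "_" t)
        else ts ++ [c]) ts
      = ts ++ l.flatMap (fun c =>
          if PySem.Str.isIn ";" c then
            (((PySem.Str.split? c ";").getD [])).filter (fun t => !PySem.Str.isIn "_" t)
          else [c]) := by
    intro l
    induction l with
    | nil => simp
    | cons c cs ih =>
      intro ts
      simp only [List.foldl_cons, List.flatMap_cons]
      by_cases h : PySem.Str.isIn ";" c = true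
      · rw [if_pos h, ih, List.append_assoc, if_pos h]
      · rw [if_neg h, ih, List.append_assoc, if_neg h]
  simpa using this celex []

-- ===== VERDICT (by name: the statement is the Claim_ definition above) =====
theorem clean_celex_spec : Claim_equal_clean_celex := by
  intro celex _
  show clean_celex celex = clean_celex_alt celex
  unfold clean_celex clean_celex_alt
  rw [aLoop_eq_tokens, tokens_eq_flatMap]
  rfl
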